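-- pv_equiv track=rewrite | github.com/PrashantSaroj/AdventOfCode | 2022/day8/part2.py | nlv_l
-- ===== SOURCE A (Python) =====
-- def nlv_l(tree_mat, r_i, row_size):
--     P = [-1 for _ in range(row_size)]
--     for i in range(row_size):
--         j = i-1
--         while j >= 0 and tree_mat[r_i][j] < tree_mat[r_i][i]:
--             j = P[j]
--         P[i] = j
--     return P
-- ===== SOURCE B (Python) =====
-- def nlv_l(tree_mat, r_i, row_size):
--     P = []
--     stack = []
--     for i in range(row_size):
--         while stack and tree_mat[r_i][stack[-1]] < tree_mat[r_i][i]: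
--             stack.pop()
--         P.append(stack[-1] if stack else -1)
--         stack.append(i)
--     return P
-- ===== Notes on version B (the rewrite author's own statement) =====
-- stated objective: alternative
-- what changed: Replaces the jump-pointer chain that re-reads the partially built result array P to hop leftwards with a monotonic stack of indices popped under a strict < comparison; P is built by appending the stack top (or -1) and no chase through P remains.
import Mathlib
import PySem

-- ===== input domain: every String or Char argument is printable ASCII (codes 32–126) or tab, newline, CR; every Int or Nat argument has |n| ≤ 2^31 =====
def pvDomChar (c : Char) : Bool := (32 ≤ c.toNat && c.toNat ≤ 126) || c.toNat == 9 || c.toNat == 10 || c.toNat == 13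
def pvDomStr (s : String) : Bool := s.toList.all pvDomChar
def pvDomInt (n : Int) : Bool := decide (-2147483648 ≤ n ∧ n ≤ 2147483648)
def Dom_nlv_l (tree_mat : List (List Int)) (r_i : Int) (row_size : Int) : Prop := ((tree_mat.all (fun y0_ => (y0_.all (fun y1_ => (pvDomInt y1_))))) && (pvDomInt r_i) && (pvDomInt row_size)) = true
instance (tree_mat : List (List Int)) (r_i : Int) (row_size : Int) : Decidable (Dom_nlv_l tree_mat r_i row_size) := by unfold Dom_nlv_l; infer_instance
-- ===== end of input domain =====

-- B replaces A's jump-pointer chase through the partially built P with a monotonic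
-- stack of indices (strict '<' popping); same values, similar cost (objective: alternative).

-- shared read of tree_mat[r_i][k]; exact under Pre_ (defaults never reached there)
def mget (tree_mat : List (List Int)) (r_i : Int) (k : Int) : Int :=
  PySem.List.pyGetD ((PySem.List.pyGet? tree_mat r_i).getD []) k 0

-- ===== PORT A =====
-- A's inner while loop: j = P[j] chasing; fuel only makes the same computation total
def nlvChase (v : Int → Int) (P : List Int) (cur : Int) : Nat → Int → Int
  | 0, j => j
  | fuel + 1, j => if 0 ≤ j ∧ v j < cur then nlvChase v P cur fuel (PySem.List.pyGetD P j (-1)) else j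

def nlv_l (tree_mat : List (List Int)) (r_i : Int) (row_size : Int) : List Int :=
  (PySem.List.pyRange 0 row_size 1).foldl
    (fun P i => PySem.List.pySetD P i
      (nlvChase (mget tree_mat r_i) P (mget tree_mat r_i i) (P.length + 1) (i - 1)))
    (List.replicate row_size.toNat (-1))

-- ===== PORT B =====
-- stack[-1] if stack else -1
def topD (s : List Int) : Int :=
  match s with
  | [] => -1
  | t :: _ => t

-- B's inner while loop: pop the stack while its top's value is < current
def nlvPop (v : Int → Int) (cur : Int) : List Int → List Int
  | [] => []
  | t :: rest => if v t < cur then nlvPop v cur rest else t :: rest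

def nlv_l_alt (tree_mat : List (List Int)) (r_i : Int) (row_size : Int) : List Int :=
  ((PySem.List.pyRange 0 row_size 1).foldl
    (fun (st : List Int × List Int) i =>
      let s := nlvPop (mget tree_mat r_i) (mget tree_mat r_i i) st.2
      (st.1 ++ [topD s], i :: s))
    ([], [])).1

-- ===== PRECONDITION & SPEC =====
-- Pre_ excludes exactly the inputs where Python raises IndexError: row_size ≥ 2
-- (for row_size ≤ 1 no matrix read ever happens) with r_i out of range or a row
-- shorter than row_size.
def Pre_nlv_l (tree_mat : List (List Int)) (r_i : Int) (row_size : Int) : Prop :=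
  row_size ≤ 1 ∨
    (PySem.List.pyGet? tree_mat r_i ≠ none ∧
      row_size ≤ (((PySem.List.pyGet? tree_mat r_i).getD []).length : Int))
instance (tree_mat : List (List Int)) (r_i : Int) (row_size : Int) : Decidable (Pre_nlv_l tree_mat r_i row_size) := by unfold Pre_nlv_l; infer_instance

def pvWitness_nlv_l : List (List Int) × Int × Int := ([[3, 1, 4, 1, 5]], 0, 5)

def Spec_nlv_l (tree_mat : List (List Int)) (r_i : Int) (row_size : Int) (out : List Int) : Prop := out = nlv_l_alt tree_mat r_i row_size
instance (tree_mat : List (List Int)) (r_i : Int) (row_size : Int) (out : List Int) : Decidable (Spec_nlv_l tree_mat r_i row_size out) := by unfold Spec_nlv_l; infer_instance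

-- ===== CLAIM (what is proved, stated in full; the proofs are below) =====
def Claim_equal_nlv_l : Prop := ∀ (tree_mat : List (List Int)) (r_i : Int) (row_size : Int), Dom_nlv_l tree_mat r_i row_size → Pre_nlv_l tree_mat r_i row_size → Spec_nlv_l tree_mat r_i row_size (nlv_l tree_mat r_i row_size)

-- ===== LEMMAS AND PROOFS =====

-- The stack is exactly A's pointer chain: top element, then P[top], then P[P[top]], …, ending at -1.
def Chain (P : List Int) : Int → List Int → Prop
  | j, [] => j = -1
  | j, t :: rest => j = t ∧ 0 ≤ j ∧ Chain P (PySem.List.pyGetD P j (-1)) rest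

lemma chase_neg_one (v : Int → Int) (P : List Int) (cur : Int) (fuel : Nat) :
    nlvChase v P cur fuel (-1) = -1 := by
  cases fuel <;> simp [nlvChase]

-- popping the stack mirrors A's chase step for step
lemma chase_pop (v : Int → Int) (P : List Int) (cur : Int) :
    ∀ (s : List Int) (j : Int) (fuel : Nat), Chain P j s → s.length ≤ fuel →
      Chain P (nlvChase v P cur fuel j) (nlvPop v cur s) := by
  intro s
  induction s with
  | nil =>
    intro j fuel hc _
    simp [Chain] at hc
    subst hc
    simpa [nlvPop, Chain] using chase_neg_one v P cur fuel
  | cons t rest ih =>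
    intro j fuel hc hf
    obtain ⟨hjt, hj0, hrest⟩ := hc
    obtain ⟨f, rfl⟩ : ∃ f, fuel = f + 1 := by
      cases fuel with
      | zero => simp at hf
      | succ f => exact ⟨f, rfl⟩
    by_cases hlt : v j < cur
    · have : nlvChase v P cur (f + 1) j = nlvChase v P cur f (PySem.List.pyGetD P j (-1)) := by
        simp [nlvChase, hj0, hlt]
      rw [this]
      have : nlvPop v cur (t :: rest) = nlvPop v cur rest := by
        simp [nlvPop, hjt ▸ hlt]
      rw [this]
      exact ih _ f hrest (by simpa using Nat.le_of_succ_le_succ hf)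
    · have h1 : nlvChase v P cur (f + 1) j = j := by simp [nlvChase, hlt]
      have h2 : nlvPop v cur (t :: rest) = t :: rest := by
        simp [nlvPop]
        intro h; exact absurd (hjt ▸ h) hlt
      rw [h1, h2]
      exact ⟨hjt, hj0, hrest⟩

lemma pop_subset (v : Int → Int) (cur : Int) :
    ∀ (s : List Int) (t : Int), t ∈ nlvPop v cur s → t ∈ s := by
  intro s
  induction s with
  | nil => intro t h; simp [nlvPop] at h
  | cons a rest ih =>
    intro t h
    by_cases hlt : v a < cur
    · simp [nlvPop, hlt] at h
      exact List.mem_cons_of_mem a (ih t h)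
    · simpa [nlvPop, hlt] using h

lemma pop_length_le (v : Int → Int) (cur : Int) :
    ∀ (s : List Int), (nlvPop v cur s).length ≤ s.length := by
  intro s
  induction s with
  | nil => simp [nlvPop]
  | cons a rest ih =>
    by_cases hlt : v a < cur
    · simp [nlvPop, hlt]; omega
    · simp [nlvPop, hlt]

lemma chain_head (P : List Int) (j : Int) (s : List Int) (h : Chain P j s) :
    topD s = j := by
  cases s with
  | nil => simpa [Chain, topD] using h.symm
  | cons t rest => exact h.1.symm

-- setting P at an index above every chain element leaves the chain intact
lemma chain_set (P : List Int) (N : Nat) (x : Int) :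
    ∀ (s : List Int) (j : Int), Chain P j s → (∀ t ∈ s, t < (N : Int)) →
      Chain (P.set N x) j s := by
  intro s
  induction s with
  | nil => intro j hc _; exact hc
  | cons t rest ih =>
    intro j hc hb
    obtain ⟨hjt, hj0, hrest⟩ := hc
    have hjN : j < (N : Int) := hjt ▸ hb t (List.mem_cons_self)
    have hget : PySem.List.pyGetD (P.set N x) j (-1) = PySem.List.pyGetD P j (-1) := by
      rw [PySem.List.pyGetD_of_nonneg _ _ hj0, PySem.List.pyGetD_of_nonneg _ _ hj0]
      have hne : N ≠ j.toNat := by omega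
      simp [List.getD, List.getElem?_set_ne hne]
    exact ⟨hjt, hj0, hget ▸ ih _ hrest (fun t ht => hb t (List.mem_cons_of_mem _ ht))⟩

-- the main loop invariant, by induction on the number of completed iterations
lemma main_inv (v : Int → Int) (n : Nat) :
    ∀ (N : Nat), N ≤ n →
      (List.range N).foldl
          (fun (P : List Int) (k : Nat) => PySem.List.pySetD P (k : Int) (nlvChase v P (v k) (P.length + 1) ((k : Int) - 1)))
          (List.replicate n (-1)) =
        ((List.range N).foldl
          (fun (st : List Int × List Int) (k : Nat) =>
            let s := nlvPop v (v k) st.2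
            (st.1 ++ [topD s], (k : Int) :: s))
          ([], [])).1 ++ List.replicate (n - N) (-1) ∧
      ((List.range N).foldl
          (fun (st : List Int × List Int) (k : Nat) =>
            let s := nlvPop v (v k) st.2
            (st.1 ++ [topD s], (k : Int) :: s))
          ([], [])).1.length = N ∧
      (((List.range N).foldl
          (fun (st : List Int × List Int) (k : Nat) =>
            let s := nlvPop v (v k) st.2
            (st.1 ++ [topD s], (k : Int) :: s))
          ([], [])).2.length ≤ N ∧
      Chain ((List.range N).foldl
          (fun (P : List Int) (k : Nat) => PySem.List.pySetD P (k : Int) (nlvChase v P (v k) (P.length + 1) ((k : Int) - 1)))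
          (List.replicate n (-1))) ((N : Int) - 1)
        ((List.range N).foldl
          (fun (st : List Int × List Int) (k : Nat) =>
            let s := nlvPop v (v k) st.2
            (st.1 ++ [topD s], (k : Int) :: s))
          ([], [])).2 ∧
      (∀ t ∈ ((List.range N).foldl
          (fun (st : List Int × List Int) (k : Nat) =>
            let s := nlvPop v (v k) st.2
            (st.1 ++ [topD s], (k : Int) :: s))
          ([], [])).2, 0 ≤ t ∧ t < (N : Int))) := by
  intro N
  induction N with
  | zero =>
    intro _
    refine ⟨by simp, by simp, by simp, ?_, by simp⟩
    simp [Chain]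
  | succ N ih =>
    intro hN
    have hN' : N ≤ n := Nat.le_of_succ_le hN
    obtain ⟨hPeq, hlen, hslen, hchain, hbound⟩ := ih hN'
    set stA := fun (P : List Int) (k : Nat) =>
      PySem.List.pySetD P (k : Int) (nlvChase v P (v k) (P.length + 1) ((k : Int) - 1)) with hstA
    set stB := fun (st : List Int × List Int) (k : Nat) =>
      let s := nlvPop v (v k) st.2
      (st.1 ++ [topD s], (k : Int) :: s) with hstB
    set A := (List.range N).foldl stA (List.replicate n (-1)) with hA
    set st := (List.range N).foldl stB ([], []) with hst
    have hAlen : A.length = n := by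
      rw [hPeq]; simp [hlen]; omega
    -- the chase from N-1 equals the pop result via the chain
    have hfuel : st.2.length ≤ A.length + 1 := by omega
    have hchasepop := chase_pop v A (v N) st.2 ((N : Int) - 1) (A.length + 1) hchain hfuel
    set j' := nlvChase v A (v N) (A.length + 1) ((N : Int) - 1) with hj'
    set s' := nlvPop v (v N) st.2 with hs'
    -- the value B appends equals j'
    have happ : topD s' = j' := chain_head A j' s' hchasepop
    have hrangeS : List.range (N + 1) = List.range N ++ [N] := List.range_succ
    have hAstep : (List.range (N + 1)).foldl stA (List.replicate n (-1)) = stA A N := by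
      rw [hrangeS, List.foldl_append]; simp [hA]
    have hBstep : (List.range (N + 1)).foldl stB ([], []) =
        (st.1 ++ [topD s'], (N : Int) :: s') := by
      rw [hrangeS, List.foldl_append]; simp [hst, hstB, hs']
    have hNlt : N < n := hN
    -- the A-side update in list form
    have hsetA : stA A N = A.set N j' := by
      simp [hstA, ← hj', PySem.List.pySetD_natCast]
    have hAset : A.set N j' = (st.1 ++ [j']) ++ List.replicate (n - (N + 1)) (-1) := by
      rw [hPeq]
      have hrep : List.replicate (n - N) (-1 : Int) = -1 :: List.replicate (n - (N + 1)) (-1) := by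
        have : n - N = (n - (N + 1)) + 1 := by omega
        rw [this, List.replicate_succ]
      rw [hrep]
      rw [List.set_append_right N j' (by omega)]
      simp [hlen]
    have hb' : ∀ t ∈ s', 0 ≤ t ∧ t < (N : Int) := fun t ht =>
      hbound t (pop_subset v (v N) st.2 t (hs' ▸ ht))
    have hchain' : Chain (A.set N j') j' s' :=
      chain_set A N j' s' j' hchasepop (fun t ht => (hb' t ht).2)
    refine ⟨?_, ?_, ?_, ?_, ?_⟩
    · rw [hAstep, hBstep, hsetA, hAset]
      simp [happ]
    · rw [hBstep]; simp [hlen]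
    · rw [hBstep]
      have := pop_length_le v (v N) st.2
      simp only []
      have : s'.length ≤ st.2.length := hs' ▸ pop_length_le v (v N) st.2
      simp [List.length_cons]
      omega
    · rw [hAstep, hBstep, hsetA]
      have hNN : ((N : Int) + 1 - 1) = (N : Int) := by ring
      push_cast
      rw [hNN]
      refine ⟨rfl, by positivity, ?_⟩
      have hget : PySem.List.pyGetD (A.set N j') (N : Int) (-1) = j' := by
        rw [PySem.List.pyGetD_natCast]
        rw [List.getD, List.getElem?_set_self (by omega)]
        rfl
      rw [hget]
      exact hchain'
    · rw [hBstep]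
      intro t ht
      simp only [List.mem_cons] at ht
      rcases ht with rfl | ht
      · exact ⟨by positivity, by push_cast; omega⟩
      · have := hb' t ht
        push_cast
        omega

-- rewrite both ports' pyRange folds as List.range folds
lemma nlv_l_eq_range (tree_mat : List (List Int)) (r_i : Int) (row_size : Int) :
    nlv_l tree_mat r_i row_size =
      (List.range row_size.toNat).foldl
        (fun (P : List Int) (k : Nat) => PySem.List.pySetD P (k : Int)
          (nlvChase (mget tree_mat r_i) P (mget tree_mat r_i k) (P.length + 1) ((k : Int) - 1)))
        (List.replicate row_size.toNat (-1)) := by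
  unfold nlv_l
  rw [PySem.List.pyRange_one, List.foldl_map]
  simp

lemma nlv_l_alt_eq_range (tree_mat : List (List Int)) (r_i : Int) (row_size : Int) :
    nlv_l_alt tree_mat r_i row_size =
      ((List.range row_size.toNat).foldl
        (fun (st : List Int × List Int) (k : Nat) =>
          let s := nlvPop (mget tree_mat r_i) (mget tree_mat r_i k) st.2
          (st.1 ++ [topD s], (k : Int) :: s))
        ([], [])).1 := by
  unfold nlv_l_alt
  rw [PySem.List.pyRange_one, List.foldl_map]
  simp

-- ===== VERDICT (by name: the statement is the Claim_ definition above) =====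
theorem nlv_l_spec : Claim_equal_nlv_l := by
  unfold Claim_equal_nlv_l
  intro tree_mat r_i row_size _ _
  unfold Spec_nlv_l
  rw [nlv_l_eq_range, nlv_l_alt_eq_range]
  have h := (main_inv (mget tree_mat r_i) row_size.toNat row_size.toNat (le_refl _)).1
  rw [h]
  simp
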